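-- pv_equiv track=rewrite | github.com/Jacopalas/agentic-ai-palas | plugins/palas-basic/skills/fixing-markdown/scripts/fix_md_extra.py | fix_multiple_h1
-- ===== SOURCE A (Python) =====
-- def fix_multiple_h1(content: str) -> str:
--     """
--     MD025: Degrada encabezados H1 duplicados a H2.
--
--     El primer H1 se mantiene, los siguientes se convierten en H2.
--     Solo afecta a líneas que empiezan con '# ' (ATX style).
--     """
--     lines = content.split('\n')
--     found_h1 = False
--
--     for i, line in enumerate(lines):
--         # Detecta H1: empieza con '# ' pero no con '## '
--         if line.startswith('# ') and not line.startswith('## '):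
--             if found_h1:
--                 # Ya encontramos un H1 antes, degradar este a H2
--                 lines[i] = '#' + line
--             else:
--                 # Primer H1, lo mantenemos
--                 found_h1 = True
--
--     return '\n'.join(lines)
-- ===== SOURCE B (Python) =====
-- def fix_multiple_h1(content: str) -> str:
--     # String-level rewrite: every H1 after the first corresponds to an
--     # occurrence of '\n# ' in the text (H2 lines start '\n## ' and never match).
--     # Split on '\n# ' and re-join demoting every boundary except the first
--     # one that has to be kept.
--     parts = content.split('\n# ')
--     if content.startswith('# '):
--         # the first line is the first H1: every '\n# ' boundary is a later H1
--         return '\n## '.join(parts)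
--     if len(parts) == 1:
--         return content
--     # parts[0] ends at the first H1: keep that one, demote the rest
--     return parts[0] + '\n# ' + '\n## '.join(parts[1:])
-- ===== Notes on version B (the rewrite author's own statement) =====
-- stated objective: alternative
-- what changed: Replaces A's per-line loop with a stateful found_h1 flag by a whole-string rewrite: B splits the raw text on the newline-hash-space separator (which marks exactly the H1 headers after the first line) and re-joins the pieces with a newline-double-hash-space separator, keeping the first such boundary intact when the first line is not itself an H1; no line list or per-line state is used.
import Mathlib
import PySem

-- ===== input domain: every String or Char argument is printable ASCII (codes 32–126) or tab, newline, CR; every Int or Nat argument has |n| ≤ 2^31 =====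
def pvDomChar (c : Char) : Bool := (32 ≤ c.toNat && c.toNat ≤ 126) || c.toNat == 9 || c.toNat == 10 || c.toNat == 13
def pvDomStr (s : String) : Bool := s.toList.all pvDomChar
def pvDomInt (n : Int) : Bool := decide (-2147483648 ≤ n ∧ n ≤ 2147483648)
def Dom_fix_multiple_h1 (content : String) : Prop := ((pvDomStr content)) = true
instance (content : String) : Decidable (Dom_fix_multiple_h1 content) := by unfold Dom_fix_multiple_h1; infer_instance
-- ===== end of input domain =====

-- B replaces A's per-line found_h1 flag loop by a whole-string rewrite: split the raw text on the newline-hash-space separator (the later-H1 boundaries) and re-join demoting them (alternative decomposition, same cost).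


-- ===== PORT A =====
-- A's for-loop with the found_h1 flag, as a structural recursion carrying the flag
def pvFixGo : List String → Bool → List String
  | [], _ => []
  | l :: ls, found =>
    if PySem.Str.startswith l "# " && !(PySem.Str.startswith l "## ") then
      if found then ("#" ++ l) :: pvFixGo ls true
      else l :: pvFixGo ls true
    else l :: pvFixGo ls found

def fix_multiple_h1 (content : String) : String :=
  PySem.Str.join "\n" (pvFixGo ((PySem.Str.split? content "\n").getD []) false)

-- ===== PORT B =====
def fix_multiple_h1_alt (content : String) : String :=
  let parts := (PySem.Str.split? content "\n# ").getD []
  if PySem.Str.startswith content "# " then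
    PySem.Str.join "\n## " parts
  else if parts.length == 1 then
    content
  else
    match parts with
    | [] => content          -- unreachable: Python's str.split always yields at least one part
    | p :: ps => p ++ "\n# " ++ PySem.Str.join "\n## " ps

-- ===== PRECONDITION & SPEC =====
def Spec_fix_multiple_h1 (content : String) (out : String) : Prop := out = fix_multiple_h1_alt content
instance (content : String) (out : String) : Decidable (Spec_fix_multiple_h1 content out) := by unfold Spec_fix_multiple_h1; infer_instance

-- ===== CLAIM (what is proved, stated in full; the proofs are below) =====
def Claim_equal_fix_multiple_h1 : Prop := ∀ (content : String), Dom_fix_multiple_h1 content → Spec_fix_multiple_h1 content (fix_multiple_h1 content)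

-- ===== LEMMAS AND PROOFS =====

-- char-level mirror of A's H1 test and of A's flag loop
def pvH1C (m : List Char) : Bool := ['#', ' '].isPrefixOf m && !(['#', '#', ' '].isPrefixOf m)

def pvDemote (m : List Char) : List Char := if ['#', ' '].isPrefixOf m then '#' :: m else m

def pvFixGoC : List (List Char) → Bool → List (List Char)
  | [], _ => []
  | l :: ls, found =>
    if pvH1C l then
      if found then ('#' :: l) :: pvFixGoC ls true
      else l :: pvFixGoC ls true
    else l :: pvFixGoC ls found

-- char-level description of splitting 'lines joined by \n' on the separator "\n# "
def pvGo2 : List (List Char) → List (List Char)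
  | [] => []
  | [l] => [l]
  | l :: m :: rest =>
    if ['#', ' '].isPrefixOf m then l :: pvGo2 (m.drop 2 :: rest)
    else List.modifyHead (fun p => l ++ '\n' :: p) (pvGo2 (m :: rest))
termination_by ls => ls.length
decreasing_by all_goals (simp; try omega)

-- small string-literal facts
theorem pvT_nl : "\n".toList = ['\n'] := by decide
theorem pvT_sep2 : "\n# ".toList = ['\n', '#', ' '] := by decide
theorem pvT_sepD : "\n## ".toList = ['\n', '#', '#', ' '] := by decide
theorem pvT_h : "# ".toList = ['#', ' '] := by decide
theorem pvT_hh : "## ".toList = ['#', '#', ' '] := by decide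
theorem pvT_hash : "#" = String.ofList ['#'] := by decide

-- intercalate utilities
theorem pvInter_single (sep x : List Char) : List.intercalate sep [x] = x := by
  simp [List.intercalate]

theorem pvInter_cons (sep x y : List Char) (xs : List (List Char)) :
    List.intercalate sep (x :: y :: xs) = x ++ sep ++ List.intercalate sep (y :: xs) := by
  simp only [List.intercalate]
  rw [show (x :: y :: xs).intersperse sep = x :: sep :: (y :: xs).intersperse sep from rfl]
  simp [List.append_assoc]

theorem pvInter_head_append (sep a y : List Char) (xs : List (List Char)) :
    List.intercalate sep ((a ++ y) :: xs) = a ++ List.intercalate sep (y :: xs) := by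
  cases xs with
  | nil => simp [pvInter_single]
  | cons z zs => rw [pvInter_cons, pvInter_cons]; simp [List.append_assoc]

-- normalization of PySem.Chars.splitOn.go: fuel irrelevance, accumulator extraction
theorem pvGo_spec (sep : List Char) (hs : 0 < sep.length) :
    ∀ (n : Nat) (l : List Char), l.length = n → ∀ (fuel : Nat) (cur : List Char) (acc : List (List Char)),
      n < fuel →
      PySem.Chars.splitOn.go sep fuel l cur acc
        = acc.reverse ++ (PySem.Chars.splitOn l sep).modifyHead (fun x => cur.reverse ++ x) := by
  intro n
  induction n using Nat.strong_induction_on with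
  | _ n ih =>
    intro l hl fuel cur acc hf
    match fuel, hf with
    | fuel + 1, _ =>
      cases l with
      | nil =>
        simp [PySem.Chars.splitOn.go, PySem.Chars.splitOn]
      | cons c rest =>
        have hstep : PySem.Chars.splitOn.go sep (fuel + 1) (c :: rest) cur acc
            = if sep.isPrefixOf (c :: rest) then
                PySem.Chars.splitOn.go sep fuel (List.drop sep.length (c :: rest)) [] (cur.reverse :: acc)
              else PySem.Chars.splitOn.go sep fuel rest (c :: cur) acc := by
          simp [PySem.Chars.splitOn.go]
        have hcanon : PySem.Chars.splitOn (c :: rest) sep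
            = if sep.isPrefixOf (c :: rest) then
                PySem.Chars.splitOn.go sep (rest.length + 1) (List.drop sep.length (c :: rest)) [] [[]]
              else PySem.Chars.splitOn.go sep (rest.length + 1) rest [c] [] := by
          show PySem.Chars.splitOn.go sep ((c :: rest).length + 1) (c :: rest) [] [] = _
          simp only [List.length_cons]
          rw [show PySem.Chars.splitOn.go sep (rest.length + 1 + 1) (c :: rest) [] []
              = if sep.isPrefixOf (c :: rest) then
                  PySem.Chars.splitOn.go sep (rest.length + 1) (List.drop sep.length (c :: rest)) [] [[]]
                else PySem.Chars.splitOn.go sep (rest.length + 1) rest [c] [] from by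
            simp [PySem.Chars.splitOn.go]]
        have hn : rest.length + 1 = n := by simpa using hl
        by_cases hp : sep.isPrefixOf (c :: rest)
        · have hdl : (List.drop sep.length (c :: rest)).length < n := by
            simp [List.length_drop]; omega
          rw [hstep, if_pos hp, hcanon, if_pos hp]
          rw [ih _ hdl _ rfl fuel [] (cur.reverse :: acc) (by omega)]
          rw [ih _ hdl _ rfl (rest.length + 1) [] [[]] (by omega)]
          cases hsp : PySem.Chars.splitOn (List.drop sep.length (c :: rest)) sep with
          | nil => simp
          | cons q qs => simp
        · have hdl : rest.length < n := by omega
          rw [hstep, if_neg hp, hcanon, if_neg hp]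
          rw [ih _ hdl _ rfl fuel (c :: cur) acc (by omega)]
          rw [ih _ hdl _ rfl (rest.length + 1) [c] [] (by omega)]
          cases hsp : PySem.Chars.splitOn rest sep with
          | nil => simp
          | cons q qs => simp

theorem pvSplit_nil (sep : List Char) : PySem.Chars.splitOn [] sep = [[]] := by
  simp [PySem.Chars.splitOn, PySem.Chars.splitOn.go]

theorem pvSplit_pos (sep : List Char) (hs : 0 < sep.length) (c : Char) (rest : List Char)
    (hp : sep.isPrefixOf (c :: rest) = true) :
    PySem.Chars.splitOn (c :: rest) sep = [] :: PySem.Chars.splitOn (List.drop sep.length (c :: rest)) sep := by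
  show PySem.Chars.splitOn.go sep ((c :: rest).length + 1) (c :: rest) [] [] = _
  simp only [List.length_cons]
  rw [show PySem.Chars.splitOn.go sep (rest.length + 1 + 1) (c :: rest) [] []
      = PySem.Chars.splitOn.go sep (rest.length + 1) (List.drop sep.length (c :: rest)) [] [[]] from by
    simp [PySem.Chars.splitOn.go, hp]]
  rw [pvGo_spec sep hs _ _ rfl (rest.length + 1) [] [[]] (by simp [List.length_drop]; omega)]
  cases hsp : PySem.Chars.splitOn (List.drop sep.length (c :: rest)) sep with
  | nil => simp
  | cons q qs => simp

theorem pvSplit_neg (sep : List Char) (hs : 0 < sep.length) (c : Char) (rest : List Char)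
    (hp : sep.isPrefixOf (c :: rest) = false) :
    PySem.Chars.splitOn (c :: rest) sep = (PySem.Chars.splitOn rest sep).modifyHead (fun x => c :: x) := by
  show PySem.Chars.splitOn.go sep ((c :: rest).length + 1) (c :: rest) [] [] = _
  simp only [List.length_cons]
  rw [show PySem.Chars.splitOn.go sep (rest.length + 1 + 1) (c :: rest) [] []
      = PySem.Chars.splitOn.go sep (rest.length + 1) rest [c] [] from by
    simp [PySem.Chars.splitOn.go, hp]]
  rw [pvGo_spec sep hs _ _ rfl (rest.length + 1) [c] [] (by omega)]
  cases hsp : PySem.Chars.splitOn rest sep with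
  | nil => simp
  | cons q qs => simp

theorem pvSplit_ne_nil (sep : List Char) (hs : 0 < sep.length) :
    ∀ l : List Char, PySem.Chars.splitOn l sep ≠ [] := by
  intro l
  induction l with
  | nil => rw [pvSplit_nil]; simp
  | cons c rest ih =>
    cases hp : sep.isPrefixOf (c :: rest) with
    | true => rw [pvSplit_pos sep hs c rest hp]; simp
    | false =>
      rw [pvSplit_neg sep hs c rest hp]
      cases hsp : PySem.Chars.splitOn rest sep with
      | nil => exact absurd hsp ih
      | cons q qs => simp

-- prefixes free of '\n' are insensitive to what follows the first newline
theorem pvPrefix_stable (p : List Char) (hp : '\n' ∉ p) :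
    ∀ (m t : List Char), p.isPrefixOf (m ++ '\n' :: t) = p.isPrefixOf m := by
  induction p with
  | nil => intro m t; simp [List.isPrefixOf]
  | cons a p' ih =>
    intro m t
    cases m with
    | nil =>
      have ha : a ≠ '\n' := fun h => hp (by simp [h])
      simp [List.isPrefixOf, ha]
    | cons b m' =>
      have hp' : '\n' ∉ p' := fun h => hp (by simp [h])
      simp [List.isPrefixOf, ih hp' m' t]

-- a newline-free chunk passes through splitOn unchanged (sep starts with '\n')
theorem pvSplit_prefix (sep : List Char) (hs : 0 < sep.length) (s' : List Char) (hsep : sep = '\n' :: s') :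
    ∀ (l t : List Char), '\n' ∉ l →
      PySem.Chars.splitOn (l ++ t) sep = (PySem.Chars.splitOn t sep).modifyHead (fun x => l ++ x) := by
  intro l
  induction l with
  | nil =>
    intro t _
    cases hsp : PySem.Chars.splitOn t sep with
    | nil => simp [hsp]
    | cons q qs => simp [hsp]
  | cons c l' ih =>
    intro t hnl
    have hc : c ≠ '\n' := fun h => hnl (by simp [h])
    have hp : sep.isPrefixOf (c :: (l' ++ t)) = false := by
      subst hsep; simp [List.isPrefixOf]
      intro h; exact absurd h.symm hc
    rw [show (c :: l') ++ t = c :: (l' ++ t) from rfl]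
    rw [pvSplit_neg sep hs c (l' ++ t) hp]
    rw [ih t (fun h => hnl (by simp [h]))]
    cases hsp : PySem.Chars.splitOn t sep with
    | nil => simp [hsp]
    | cons q qs => simp [hsp]

-- splitting on '\n' inverts joining on '\n', and parts are newline-free
theorem pvL0 : ∀ l : List Char,
    List.intercalate ['\n'] (PySem.Chars.splitOn l ['\n']) = l
    ∧ ∀ p ∈ PySem.Chars.splitOn l ['\n'], '\n' ∉ p := by
  intro l
  induction l with
  | nil => rw [pvSplit_nil]; exact ⟨by simp [pvInter_single], by simp⟩
  | cons c rest ih =>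
    obtain ⟨q, qs, hq⟩ := List.exists_cons_of_ne_nil (pvSplit_ne_nil ['\n'] (by decide) rest)
    by_cases hc : c = '\n'
    · have hp : (['\n'] : List Char).isPrefixOf (c :: rest) = true := by
        simp [List.isPrefixOf, hc]
      rw [pvSplit_pos ['\n'] (by decide) c rest hp]
      rw [show List.drop (['\n'] : List Char).length (c :: rest) = rest from rfl]
      refine ⟨?_, ?_⟩
      · rw [hq, pvInter_cons, ← hq, ih.1]
        simp [hc]
      · intro p hpm
        rcases List.mem_cons.mp hpm with h | h
        · subst h; simp
        · exact ih.2 p h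
    · have hp : (['\n'] : List Char).isPrefixOf (c :: rest) = false := by
        simp [List.isPrefixOf]
        intro h; exact absurd h.symm hc
      rw [pvSplit_neg ['\n'] (by decide) c rest hp, hq]
      refine ⟨?_, ?_⟩
      · rw [show List.modifyHead (fun x => c :: x) (q :: qs) = ((c :: q) :: qs) from rfl]
        rw [show ((c :: q) :: qs) = (([c] ++ q) :: qs) from rfl]
        rw [pvInter_head_append, ← hq, ih.1]
        simp
      · intro p hpm
        rcases List.mem_cons.mp hpm with h | h
        · subst h
          intro hmem
          rcases List.mem_cons.mp hmem with h' | h'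
          · exact hc h'.symm
          · exact ih.2 q (by rw [hq]; exact List.mem_cons_self ..) h'
        · exact ih.2 p (by rw [hq]; exact List.mem_cons.mpr (Or.inr h))

-- A's two-startswith test collapses: a line starting '# ' never starts '## '
theorem pvH1C_eq (m : List Char) : pvH1C m = ['#', ' '].isPrefixOf m := by
  cases m with
  | nil => simp [pvH1C, List.isPrefixOf]
  | cons c1 m1 =>
    cases m1 with
    | nil => simp [pvH1C, List.isPrefixOf]
    | cons c2 m2 =>
      by_cases h2 : c2 = ' '
      · subst h2; simp [pvH1C, List.isPrefixOf]
      · simp [pvH1C, List.isPrefixOf]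
        intro _ h; exact absurd h.symm h2

theorem pvPrefixH (m : List Char) (hm : ['#', ' '].isPrefixOf m = true) :
    ∃ m2, m = '#' :: ' ' :: m2 := by
  cases m with
  | nil => simp [List.isPrefixOf] at hm
  | cons c1 m1 =>
    cases m1 with
    | nil => simp [List.isPrefixOf] at hm
    | cons c2 m2 =>
      simp [List.isPrefixOf] at hm
      exact ⟨m2, by simp [hm.1.symm, hm.2.symm]⟩

theorem pvFixGoC_true : ∀ ls : List (List Char), pvFixGoC ls true = ls.map pvDemote := by
  intro ls
  induction ls with
  | nil => rfl
  | cons l t ih =>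
    show (if pvH1C l then _ else _) = _
    rw [pvH1C_eq]
    cases h : (['#', ' '] : List Char).isPrefixOf l with
    | true => simp [h, ih, pvDemote]
    | false => simp [h, ih, pvDemote]

theorem pvGo2_ne_nil : ∀ (n : Nat) (ls : List (List Char)), ls.length = n → ls ≠ [] → pvGo2 ls ≠ [] := by
  intro n
  induction n using Nat.strong_induction_on with
  | _ n ih =>
    intro ls hn hne
    match ls with
    | [l] => simp [pvGo2]
    | l :: m :: rest =>
      rw [pvGo2]
      cases hm : (['#', ' '] : List Char).isPrefixOf m with
      | true => simp [hm]
      | false =>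
        simp only [hm, Bool.false_eq_true, if_false]
        have h := ih (rest.length + 1) (by simp at hn; omega) (m :: rest) (by simp) (by simp)
        cases hsp : pvGo2 (m :: rest) with
        | nil => exact absurd hsp h
        | cons q qs => simp [hsp]

-- joining pvGo2's parts with '\n## ' demotes every H1 after the head line
theorem pvG : ∀ (t : List (List Char)) (l : List Char),
    List.intercalate ['\n', '#', '#', ' '] (pvGo2 (l :: t))
      = List.intercalate ['\n'] (l :: t.map pvDemote) := by
  intro t
  induction t with
  | nil => intro l; simp [pvGo2, pvInter_single]
  | cons m rs ih =>
    intro l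
    cases hm : (['#', ' '] : List Char).isPrefixOf m with
    | true =>
      obtain ⟨m2, rfl⟩ := pvPrefixH m hm
      rw [pvGo2]
      simp only [hm, if_true]
      rw [show ('#' :: ' ' :: m2).drop 2 = m2 from rfl]
      obtain ⟨q, qs, hq⟩ := List.exists_cons_of_ne_nil
        (pvGo2_ne_nil (rs.length + 1) (m2 :: rs) (by simp) (by simp))
      rw [hq, pvInter_cons, ← hq, ih m2]
      rw [List.map_cons, pvInter_cons]
      rw [show pvDemote ('#' :: ' ' :: m2) = ['#', '#', ' '] ++ m2 from by simp [pvDemote, hm, List.isPrefixOf]]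
      rw [pvInter_head_append]
      simp [List.append_assoc]
    | false =>
      rw [pvGo2]
      simp only [hm, Bool.false_eq_true, if_false]
      obtain ⟨q, qs, hq⟩ := List.exists_cons_of_ne_nil
        (pvGo2_ne_nil (rs.length + 1) (m :: rs) (by simp) (by simp))
      rw [hq]
      rw [show List.modifyHead (fun p => l ++ '\n' :: p) (q :: qs) = ((l ++ '\n' :: q) :: qs) from rfl]
      rw [show ((l ++ '\n' :: q) :: qs) = (((l ++ ['\n']) ++ q) :: qs) from by simp]
      rw [pvInter_head_append, ← hq, ih m]
      rw [List.map_cons, pvInter_cons]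
      rw [show pvDemote m = m from by simp [pvDemote, hm]]

-- the head line never starts '# ' ⇒ pvGo2 has one part (no later H1) or first boundary is the first H1
theorem pvM : ∀ (t : List (List Char)) (l : List Char), ['#', ' '].isPrefixOf l = false →
    (pvGo2 (l :: t) = [List.intercalate ['\n'] (l :: t)] ∧ pvFixGoC (l :: t) false = l :: t)
    ∨ (∃ p ps, ps ≠ [] ∧ pvGo2 (l :: t) = p :: ps ∧
        p ++ '\n' :: '#' :: ' ' :: List.intercalate ['\n', '#', '#', ' '] ps
          = List.intercalate ['\n'] (pvFixGoC (l :: t) false)) := by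
  intro t
  induction t with
  | nil =>
    intro l hl
    left
    refine ⟨by simp [pvGo2, pvInter_single], ?_⟩
    show (if pvH1C l then _ else _) = _
    rw [pvH1C_eq]
    simp [hl, pvFixGoC]
  | cons m rs ih =>
    intro l hl
    have hfixl : pvFixGoC (l :: m :: rs) false = l :: pvFixGoC (m :: rs) false := by
      show (if pvH1C l then _ else _) = _
      rw [pvH1C_eq]; simp [hl]
    cases hm : (['#', ' '] : List Char).isPrefixOf m with
    | true =>
      right
      obtain ⟨m2, rfl⟩ := pvPrefixH m hm
      obtain ⟨q, qs, hq⟩ := List.exists_cons_of_ne_nil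
        (pvGo2_ne_nil (rs.length + 1) (m2 :: rs) (by simp) (by simp))
      refine ⟨l, q :: qs, by simp, ?_, ?_⟩
      · rw [pvGo2]
        simp only [hm, if_true]
        rw [show ('#' :: ' ' :: m2).drop 2 = m2 from rfl, hq]
      · have hfixm : pvFixGoC (('#' :: ' ' :: m2) :: rs) false
            = ('#' :: ' ' :: m2) :: List.map pvDemote rs := by
          show (if pvH1C ('#' :: ' ' :: m2) then _ else _) = _
          rw [pvH1C_eq]
          simp [hm, pvFixGoC_true]
        rw [hfixl, hfixm, pvInter_cons, ← hq, pvG rs m2]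
        rw [show (('#' :: ' ' :: m2) :: List.map pvDemote rs)
            = ((['#', ' '] ++ m2) :: List.map pvDemote rs) from rfl]
        rw [pvInter_head_append]
        simp [List.append_assoc]
    | false =>
      rcases ih m hm with ⟨h1, h2⟩ | ⟨p, ps, hps, hgo, heq⟩
      · left
        constructor
        · rw [pvGo2]
          simp only [hm, Bool.false_eq_true, if_false, h1]
          rw [show List.modifyHead (fun p => l ++ '\n' :: p)
              [List.intercalate ['\n'] (m :: rs)] = [l ++ '\n' :: List.intercalate ['\n'] (m :: rs)] from rfl]
          rw [pvInter_cons]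
          simp [List.append_assoc]
        · rw [hfixl, h2]
      · right
        refine ⟨l ++ '\n' :: p, ps, hps, ?_, ?_⟩
        · rw [pvGo2]
          simp only [hm, Bool.false_eq_true, if_false, hgo]
          rfl
        · obtain ⟨z, zs, hz⟩ : ∃ z zs, pvFixGoC (m :: rs) false = z :: zs := by
            show ∃ z zs, (if pvH1C m then _ else _) = z :: zs
            cases h : pvH1C m with
            | true => exact ⟨_, _, rfl⟩
            | false => exact ⟨_, _, rfl⟩
          rw [hfixl, hz, pvInter_cons, ← hz, ← heq]
          simp [List.append_assoc]

-- the '# '-prefix test on the joined text reads the head line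
theorem pvHeadPrefixInter : ∀ (t : List (List Char)) (l : List Char),
    (['#', ' '] : List Char).isPrefixOf (List.intercalate ['\n'] (l :: t))
      = (['#', ' '] : List Char).isPrefixOf l := by
  intro t l
  cases t with
  | nil => simp [pvInter_single]
  | cons m rs =>
    rw [pvInter_cons]
    rw [show l ++ ['\n'] ++ List.intercalate ['\n'] (m :: rs)
        = l ++ '\n' :: List.intercalate ['\n'] (m :: rs) from by simp]
    exact pvPrefix_stable ['#', ' '] (by decide) l _

-- the "\n# " test on '\n'-prefixed joined text reads its head line too
theorem pvSep2Prefix (T : List Char) :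
    (['\n', '#', ' '] : List Char).isPrefixOf ('\n' :: T) = (['#', ' '] : List Char).isPrefixOf T := by
  simp [List.isPrefixOf]

-- drop 2 commutes with joining when the head line starts '# '
theorem pvInterDrop2 (rest : List (List Char)) (m2 : List Char) :
    (List.intercalate ['\n'] (('#' :: ' ' :: m2) :: rest)).drop 2 = List.intercalate ['\n'] (m2 :: rest) := by
  cases rest with
  | nil => simp [pvInter_single]
  | cons z zs => rw [pvInter_cons, pvInter_cons]; simp

-- the main split lemma: splitting joined lines on "\n# " is pvGo2 of the lines
theorem pvL2 : ∀ (n : Nat) (ls : List (List Char)), ls.length = n → ls ≠ [] → (∀ x ∈ ls, '\n' ∉ x) →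
    PySem.Chars.splitOn (List.intercalate ['\n'] ls) ['\n', '#', ' '] = pvGo2 ls := by
  intro n
  induction n using Nat.strong_induction_on with
  | _ n ih =>
    intro ls hn hne hnf
    match ls with
    | [l] =>
      rw [pvInter_single]
      have h := pvSplit_prefix ['\n', '#', ' '] (by decide) ['#', ' '] rfl l [] (hnf l (by simp))
      rw [show (l ++ [] : List Char) = l from by simp] at h
      rw [h, pvSplit_nil]
      simp [pvGo2]
    | l :: m :: rest =>
      have hnfl : '\n' ∉ l := hnf l (by simp)
      rw [pvInter_cons]
      rw [show l ++ ['\n'] ++ List.intercalate ['\n'] (m :: rest)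
          = l ++ '\n' :: List.intercalate ['\n'] (m :: rest) from by simp]
      rw [pvSplit_prefix ['\n', '#', ' '] (by decide) ['#', ' '] rfl l _ hnfl]
      cases hm : (['#', ' '] : List Char).isPrefixOf m with
      | true =>
        have hp : (['\n', '#', ' '] : List Char).isPrefixOf ('\n' :: List.intercalate ['\n'] (m :: rest)) = true := by
          rw [pvSep2Prefix, pvHeadPrefixInter]; exact hm
        rw [pvSplit_pos ['\n', '#', ' '] (by decide) '\n' _ hp]
        obtain ⟨m2, rfl⟩ := pvPrefixH m hm
        rw [show List.drop (['\n', '#', ' '] : List Char).length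
              ('\n' :: List.intercalate ['\n'] (('#' :: ' ' :: m2) :: rest))
            = (List.intercalate ['\n'] (('#' :: ' ' :: m2) :: rest)).drop 2 from rfl]
        rw [pvInterDrop2]
        have hnf2 : ∀ x ∈ m2 :: rest, '\n' ∉ x := by
          intro x hx
          rcases List.mem_cons.mp hx with h | h
          · subst h
            intro hc
            exact hnf ('#' :: ' ' :: x) (by simp) (by simp [hc])
          · exact hnf x (by simp [h])
        rw [ih (rest.length + 1) (by simp at hn; omega) (m2 :: rest) (by simp) (by simp) hnf2]
        rw [pvGo2]
        simp only [hm, if_true]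
        rw [show ('#' :: ' ' :: m2).drop 2 = m2 from rfl]
        cases hsp : pvGo2 (m2 :: rest) with
        | nil => simp [hsp]
        | cons q qs => simp [hsp]
      | false =>
        have hp : (['\n', '#', ' '] : List Char).isPrefixOf ('\n' :: List.intercalate ['\n'] (m :: rest)) = false := by
          rw [pvSep2Prefix, pvHeadPrefixInter]; exact hm
        rw [pvSplit_neg ['\n', '#', ' '] (by decide) '\n' _ hp]
        have hnf2 : ∀ x ∈ m :: rest, '\n' ∉ x := fun x hx => hnf x (by simp [List.mem_cons.mp hx])
        rw [ih (rest.length + 1) (by simp at hn; omega) (m :: rest) (by simp) (by simp) hnf2]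
        rw [pvGo2]
        simp only [hm, Bool.false_eq_true, if_false]
        obtain ⟨q, qs, hq⟩ := List.exists_cons_of_ne_nil
          (pvGo2_ne_nil (rest.length + 1) (m :: rest) (by simp) (by simp))
        rw [hq]
        rfl

-- bridges between the String-level ports and the char-level functions
theorem pvStartswith_ofList (l : List Char) (p : String) :
    PySem.Str.startswith (String.ofList l) p = p.toList.isPrefixOf l := by
  simp [PySem.Chars.startswith]

theorem pvFix_bridge : ∀ (ls : List (List Char)) (b : Bool),
    pvFixGo (ls.map String.ofList) b = (pvFixGoC ls b).map String.ofList := by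
  intro ls
  induction ls with
  | nil => intro b; rfl
  | cons l t ih =>
    intro b
    show (if PySem.Str.startswith (String.ofList l) "# " && !(PySem.Str.startswith (String.ofList l) "## ")
          then _ else _) = _
    rw [pvStartswith_ofList, pvStartswith_ofList, pvT_h, pvT_hh]
    rw [show ((['#', ' '] : List Char).isPrefixOf l && !((['#', '#', ' '] : List Char).isPrefixOf l)) = pvH1C l from rfl]
    cases h : pvH1C l with
    | true =>
      cases b with
      | true =>
        rw [show pvFixGoC (l :: t) true = ('#' :: l) :: pvFixGoC t true from by
          show (if pvH1C l then _ else _) = _; rw [h]; rfl]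
        simp only [h, if_true, ih, List.map_cons]
        rw [pvT_hash, ← String.ofList_append]
        rfl
      | false =>
        rw [show pvFixGoC (l :: t) false = l :: pvFixGoC t true from by
          show (if pvH1C l then _ else _) = _; rw [h]; rfl]
        simp [h, ih]
    | false =>
      rw [show pvFixGoC (l :: t) b = l :: pvFixGoC t b from by
        show (if pvH1C l then _ else _) = _; rw [h]; rfl]
      simp [h, ih]

theorem pvSplit_bridge (s : String) (sep : String) (h : sep.toList.isEmpty = false) :
    (PySem.Str.split? s sep).getD []
      = (PySem.Chars.splitOn s.toList sep.toList).map String.ofList := by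
  simp [PySem.Str.split?, PySem.Chars.split?, h]

theorem pvJoin_bridge (sep : String) (parts : List (List Char)) :
    PySem.Str.join sep (parts.map String.ofList)
      = String.ofList (List.intercalate sep.toList parts) := by
  simp [PySem.Str.join, PySem.Chars.join, List.map_map, Function.comp_def, String.toList_ofList]

-- ===== VERDICT (by name: the statement is the Claim_ definition above) =====
theorem fix_multiple_h1_spec : Claim_equal_fix_multiple_h1 := by
  intro content _
  unfold Spec_fix_multiple_h1
  obtain ⟨hinter, hnf⟩ := pvL0 content.toList
  obtain ⟨l, t, hls⟩ := List.exists_cons_of_ne_nil (pvSplit_ne_nil ['\n'] (by decide) content.toList)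
  -- A's value
  have hA : fix_multiple_h1 content
      = String.ofList (List.intercalate ['\n'] (pvFixGoC (l :: t) false)) := by
    unfold fix_multiple_h1
    rw [pvSplit_bridge content "\n" (by rw [pvT_nl]; rfl), pvT_nl, hls, pvFix_bridge, pvJoin_bridge, pvT_nl]
  -- B's parts
  have hparts : (PySem.Str.split? content "\n# ").getD []
      = (pvGo2 (l :: t)).map String.ofList := by
    rw [pvSplit_bridge content "\n# " (by rw [pvT_sep2]; rfl), pvT_sep2]
    rw [show content.toList = List.intercalate ['\n'] (l :: t) from by rw [← hls, hinter]]
    rw [pvL2 (l :: t).length (l :: t) rfl (by simp) (by intro x hx; exact hnf x (hls ▸ hx))]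
  -- B's first branch condition
  have hcond : PySem.Str.startswith content "# "
      = (['#', ' '] : List Char).isPrefixOf l := by
    rw [show content = String.ofList content.toList from String.ofList_toList.symm]
    rw [pvStartswith_ofList, pvT_h]
    rw [show content.toList = List.intercalate ['\n'] (l :: t) from by rw [← hls, hinter]]
    exact pvHeadPrefixInter t l
  unfold fix_multiple_h1_alt
  simp only [hparts, hcond]
  cases hH : (['#', ' '] : List Char).isPrefixOf l with
  | true =>
    simp only [hH, if_true]
    rw [pvJoin_bridge, pvT_sepD, pvG, hA]
    have hfix : pvFixGoC (l :: t) false = l :: List.map pvDemote t := by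
      show (if pvH1C l then _ else _) = _
      rw [pvH1C_eq]
      simp [hH, pvFixGoC_true]
    rw [hfix]
  | false =>
    simp only [hH, Bool.false_eq_true, if_false]
    rcases pvM t l hH with ⟨h1, h2⟩ | ⟨p, ps, hps, hgo, heq⟩
    · rw [h1]
      simp only [List.map_cons, List.map_nil, List.length_cons, List.length_nil]
      rw [if_pos (by decide)]
      rw [hA, h2]
      rw [show List.intercalate ['\n'] (l :: t) = content.toList from by rw [← hls, hinter]]
      exact String.ofList_toList
    · rw [hgo]
      simp only [List.map_cons, List.length_cons, List.length_map]
      rw [if_neg (by simp [hps])]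
      rw [pvJoin_bridge, pvT_sepD]
      rw [hA, ← heq]
      rw [show ("\n# " : String) = String.ofList ['\n', '#', ' '] from by decide]
      rw [← String.ofList_append, ← String.ofList_append]
      simp [List.append_assoc]
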